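-- pv_equiv track=rewrite | github.com/srujith07/Python-Problems | String_Exercises/Strings_15.py | excercise_15
-- ===== SOURCE A (Python) =====
-- def excercise_15(str_x):
--     result = ""
--     for i in str_x:
--         t = i.lower()
--         if t.isalpha() or i == " ":
--             result+=i
--     result = ' '.join(result.split())
--     return result
-- ===== SOURCE B (Python) =====
-- def excercise_15(str_x):
--     words = []
--     cur = []
--     for i in str_x:
--         if i.lower().isalpha():
--             cur.append(i)
--         elif i == " ":
--             if cur:
--                 words.append(''.join(cur))
--             cur = []
--     if cur:
--         words.append(''.join(cur))
--     return ' '.join(words)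
-- ===== Notes on version B (the rewrite author's own statement) =====
-- stated objective: alternative
-- what changed: Replaces A's filter-string-then-split-then-join pipeline with a single pass that assembles words directly (accumulate letters into a buffer, flush on a literal space, skip other characters).
import Mathlib
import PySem

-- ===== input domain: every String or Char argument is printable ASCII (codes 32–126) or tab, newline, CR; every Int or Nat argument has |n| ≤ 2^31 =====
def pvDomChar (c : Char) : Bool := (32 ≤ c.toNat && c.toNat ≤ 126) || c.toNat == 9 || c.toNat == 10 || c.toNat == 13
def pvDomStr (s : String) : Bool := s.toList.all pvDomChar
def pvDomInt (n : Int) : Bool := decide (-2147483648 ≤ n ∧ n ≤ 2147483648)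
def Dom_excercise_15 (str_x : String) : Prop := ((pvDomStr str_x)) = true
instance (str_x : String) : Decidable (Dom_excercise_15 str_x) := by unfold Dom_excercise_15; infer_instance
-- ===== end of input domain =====

-- B assembles the words in one pass (letter → buffer, literal space → flush, other → skip)
-- instead of A's filter-then-split-then-join pipeline; same result, alternative decomposition.


-- ===== PORT A =====
def excercise_15 (str_x : String) : String :=
  let result : List Char := str_x.toList.foldl (fun result i =>
    let t := PySem.Chars.lowerChar i
    if PySem.Chars.isalpha t || i == ' ' then result ++ [i] else result) []
  String.ofList (PySem.Chars.join [' '] (PySem.Chars.split₀ result))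

-- ===== PORT B =====
-- one loop step of B: letters extend the current word, a space flushes it, anything else is skipped
def altStep (st : List (List Char) × List Char) (i : Char) : List (List Char) × List Char :=
  if PySem.Chars.isalpha (PySem.Chars.lowerChar i) then (st.1, st.2 ++ [i])
  else if i == ' ' then (if st.2.isEmpty then st.1 else st.1 ++ [st.2], [])
  else st

def excercise_15_alt (str_x : String) : String :=
  let st := str_x.toList.foldl altStep ([], [])
  String.ofList (PySem.Chars.join [' '] (if st.2.isEmpty then st.1 else st.1 ++ [st.2]))

-- ===== PRECONDITION & SPEC =====
def Spec_excercise_15 (str_x : String) (out : String) : Prop := out = excercise_15_alt str_x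
instance (str_x : String) (out : String) : Decidable (Spec_excercise_15 str_x out) := by unfold Spec_excercise_15; infer_instance

-- ===== CLAIM (what is proved, stated in full; the proofs are below) =====
def Claim_equal_excercise_15 : Prop := ∀ (str_x : String), Dom_excercise_15 str_x → Spec_excercise_15 str_x (excercise_15 str_x)

-- ===== LEMMAS AND PROOFS =====

-- a character whose lowercase is alphabetic is never Python-whitespace
theorem alpha_not_space (c : Char) (h : PySem.Chars.isalpha (PySem.Chars.lowerChar c) = true) :
    PySem.Chars.isspace c = false := by
  simp only [PySem.Chars.isalpha, PySem.Chars.isupper, PySem.Chars.islower,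
        PySem.Chars.lowerChar, PySem.Chars.isspace, Char.le_def, Char.toNat] at *
  split at h <;> simp_all [UInt32.le_iff_toNat_le] <;> omega

-- A's keep-test as a predicate
def keepA (c : Char) : Bool := PySem.Chars.isalpha (PySem.Chars.lowerChar c) || (c == ' ')

-- A's filter loop builds exactly List.filter keepA
theorem filter_loop (cs : List Char) (init : List Char) :
    cs.foldl (fun result i =>
      let t := PySem.Chars.lowerChar i
      if PySem.Chars.isalpha t || i == ' ' then result ++ [i] else result) init
      = init ++ cs.filter keepA := by
  induction cs generalizing init with
  | nil => simp
  | cons c cs ih =>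
    rw [List.foldl_cons]
    have hstep : (let t := PySem.Chars.lowerChar c
        if PySem.Chars.isalpha t || c == ' ' then init ++ [c] else init)
        = if keepA c then init ++ [c] else init := rfl
    rw [hstep, ih, List.filter_cons]
    by_cases h : keepA c = true <;> simp [h]

-- splitting the filtered string on whitespace is exactly B's word-assembly loop
theorem go_fold (cs : List Char) (cur : List Char) (acc : List (List Char)) :
    PySem.Chars.split₀.go (cs.filter keepA) cur acc =
      (let st := cs.foldl altStep (acc.reverse, cur.reverse);
       if st.2.isEmpty then st.1 else st.1 ++ [st.2]) := by
  induction cs generalizing cur acc with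
  | nil =>
    simp only [List.filter_nil, List.foldl_nil, PySem.Chars.split₀.go]
    by_cases h : cur = [] <;> simp [h]
  | cons c cs ih =>
    by_cases ha : PySem.Chars.isalpha (PySem.Chars.lowerChar c) = true
    · have hk : keepA c = true := by simp [keepA, ha]
      have hs := alpha_not_space c ha
      rw [List.filter_cons_of_pos hk, List.foldl_cons]
      rw [show PySem.Chars.split₀.go (c :: List.filter keepA cs) cur acc =
            PySem.Chars.split₀.go (List.filter keepA cs) (c :: cur) acc by
          simp [PySem.Chars.split₀.go, hs]]
      rw [ih (c :: cur) acc]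
      simp [altStep, ha]
    · by_cases hsp : c = ' '
      · subst hsp
        have hk : keepA ' ' = true := by simp [keepA]
        rw [List.filter_cons_of_pos hk, List.foldl_cons]
        have hs : PySem.Chars.isspace ' ' = true := by decide
        by_cases hc : cur = []
        · subst hc
          rw [show PySem.Chars.split₀.go (' ' :: List.filter keepA cs) [] acc =
                PySem.Chars.split₀.go (List.filter keepA cs) [] acc by
              simp [PySem.Chars.split₀.go, hs]]
          rw [ih [] acc]
          simp [altStep, ha]
        · rw [show PySem.Chars.split₀.go (' ' :: List.filter keepA cs) cur acc =
                PySem.Chars.split₀.go (List.filter keepA cs) [] (cur.reverse :: acc) by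
              simp [PySem.Chars.split₀.go, hs, hc]]
          rw [ih [] (cur.reverse :: acc)]
          simp [altStep, ha, hc]
      · have hk : keepA c = false := by simp [keepA, ha, hsp]
        rw [List.filter_cons_of_neg (by simp [hk]), List.foldl_cons]
        rw [ih cur acc]
        simp [altStep, ha, hsp]

-- ===== VERDICT (by name: the statement is the Claim_ definition above) =====
theorem excercise_15_spec : Claim_equal_excercise_15 := by
  intro s _
  unfold Spec_excercise_15 excercise_15 excercise_15_alt PySem.Chars.split₀
  simp only [filter_loop, List.nil_append, go_fold, List.reverse_nil]
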